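-- pv_equiv track=rewrite | github.com/daormar/geno-debasher | utils/query_ega_metadata.py | group_formatted_info_by_donor
-- ===== SOURCE A (Python) =====
-- def filter_fields(entry,field_list):
--     if(field_list):
--         filtered_entry=[]
--         for field in field_list:
--             filtered_entry.append(entry[field])
--         return filtered_entry
--     else:
--         return entry
--
-- def group_formatted_info_by_donor(formatted_info,field_list):
--     # Create and populate map to make grouping easier
--     group_map={}
--     for elem in formatted_info:
--         donor_id_idx=5
--         if(elem[donor_id_idx] in group_map):
--             group_map[elem[donor_id_idx]].append(filter_fields(elem,field_list))
--         else:
--             group_map[elem[donor_id_idx]]=[]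
--             group_map[elem[donor_id_idx]].append(filter_fields(elem,field_list))
--     # Create grouped info
--     formatted_info_grouped=[]
--     for key in group_map:
--         tmplist=[]
--         for elem in group_map[key]:
--             if(tmplist):
--                 tmplist.append((";"))
--             tmplist.append(elem)
--         flattmplist=[item for sublist in tmplist for item in sublist]
--         formatted_info_grouped.append(flattmplist)
--
--     return formatted_info_grouped
-- ===== SOURCE B (Python) =====
-- def group_formatted_info_by_donor(formatted_info, field_list):
--     # One pass: map donor id -> already-flattened grouped row; no intermediate
--     # list-of-entries, no separator-insertion/flatten post-pass.
--     group_map = {}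
--     for elem in formatted_info:
--         f = [elem[i] for i in field_list] if field_list else list(elem)
--         d = elem[5]
--         if d in group_map:
--             group_map[d].append(';')
--             group_map[d].extend(f)
--         else:
--             group_map[d] = f
--     return list(group_map.values())
-- ===== Notes on version B (the rewrite author's own statement) =====
-- stated objective: simpler
-- what changed: B builds each donor's flattened row directly in one pass over the records (dict donor -> flattened list, appending ';' before each later record's fields), removing A's intermediate list-of-entries per donor and its whole second grouping pass with separator insertion and flatten comprehension.
import Mathlib
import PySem

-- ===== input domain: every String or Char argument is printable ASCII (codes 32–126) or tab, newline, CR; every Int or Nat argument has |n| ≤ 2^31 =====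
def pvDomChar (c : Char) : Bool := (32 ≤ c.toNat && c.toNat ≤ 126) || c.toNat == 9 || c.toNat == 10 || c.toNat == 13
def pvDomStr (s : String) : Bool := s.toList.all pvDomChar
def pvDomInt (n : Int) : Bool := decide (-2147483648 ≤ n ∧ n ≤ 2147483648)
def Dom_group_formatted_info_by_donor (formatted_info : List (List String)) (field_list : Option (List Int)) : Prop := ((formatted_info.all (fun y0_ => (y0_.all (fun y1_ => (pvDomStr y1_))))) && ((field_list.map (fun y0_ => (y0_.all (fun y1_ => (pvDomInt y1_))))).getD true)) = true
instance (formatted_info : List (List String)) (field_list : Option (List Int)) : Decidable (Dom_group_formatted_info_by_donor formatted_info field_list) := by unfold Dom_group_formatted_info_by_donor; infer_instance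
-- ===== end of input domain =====

-- B builds each donor's flattened row directly in one pass (dict donor -> flattened row),
-- removing A's per-donor list-of-entries and its whole second separator-insert/flatten pass (objective: simpler).

-- ===== PORT A =====
def filter_fields (entry : List String) (field_list : Option (List Int)) : List String :=
  match field_list with
  | some fl =>
      if fl ≠ [] then
        fl.foldl (fun filtered_entry field =>
          filtered_entry ++ [(PySem.List.pyGet? entry field).getD ""]) []
      else entry
  | none => entry

def group_formatted_info_by_donor (formatted_info : List (List String)) (field_list : Option (List Int)) : List (List String) :=
  let group_map : PySem.Dict String (List (List String)) :=
    formatted_info.foldl (fun group_map elem =>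
      let donor_id := (PySem.List.pyGet? elem 5).getD ""
      if group_map.contains donor_id then
        group_map.insert donor_id (((group_map.get? donor_id).getD []) ++ [filter_fields elem field_list])
      else
        group_map.insert donor_id ([] ++ [filter_fields elem field_list]))
      PySem.Dict.empty
  group_map.keys.foldl (fun formatted_info_grouped key =>
    let tmplist := ((group_map.get? key).getD []).foldl
      (fun tmplist e => (if tmplist ≠ [] then tmplist ++ [[";"]] else tmplist) ++ [e])
      ([] : List (List String))
    formatted_info_grouped ++ [tmplist.flatten]) []

-- ===== PORT B =====
def group_formatted_info_by_donor_alt (formatted_info : List (List String)) (field_list : Option (List Int)) : List (List String) :=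
  (formatted_info.foldl (fun group_map elem =>
      let f : List String :=
        match field_list with
        | some fl => if fl ≠ [] then fl.map (fun i => (PySem.List.pyGet? elem i).getD "") else elem
        | none => elem
      let d := (PySem.List.pyGet? elem 5).getD ""
      match group_map.get? d with
      | some cur => group_map.insert d (cur ++ ";" :: f)
      | none => group_map.insert d f)
    (PySem.Dict.empty : PySem.Dict String (List String))).values

-- ===== PRECONDITION & SPEC =====
-- Pre_ excludes exactly the inputs where the Python raises IndexError: a record shorter
-- than 6 (elem[5]) or a field index out of range for some record.
def Pre_group_formatted_info_by_donor (formatted_info : List (List String)) (field_list : Option (List Int)) : Prop :=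
  ∀ elem ∈ formatted_info, 6 ≤ elem.length ∧
    ∀ f ∈ field_list.getD [], -(elem.length : Int) ≤ f ∧ f < (elem.length : Int)
instance (formatted_info : List (List String)) (field_list : Option (List Int)) : Decidable (Pre_group_formatted_info_by_donor formatted_info field_list) := by unfold Pre_group_formatted_info_by_donor; infer_instance

def pvWitness_group_formatted_info_by_donor : List (List String) × Option (List Int) :=
  ([["a","b","c","d","e","D1"], ["x","y","z","u","v","D1"]], some [0, -1])

def Spec_group_formatted_info_by_donor (formatted_info : List (List String)) (field_list : Option (List Int)) (out : List (List String)) : Prop := out = group_formatted_info_by_donor_alt formatted_info field_list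
instance (formatted_info : List (List String)) (field_list : Option (List Int)) (out : List (List String)) : Decidable (Spec_group_formatted_info_by_donor formatted_info field_list out) := by unfold Spec_group_formatted_info_by_donor; infer_instance

-- ===== CLAIM (what is proved, stated in full; the proofs are below) =====
def Claim_equal_group_formatted_info_by_donor : Prop := ∀ (formatted_info : List (List String)) (field_list : Option (List Int)), Dom_group_formatted_info_by_donor formatted_info field_list → Pre_group_formatted_info_by_donor formatted_info field_list → Spec_group_formatted_info_by_donor formatted_info field_list (group_formatted_info_by_donor formatted_info field_list)

-- ===== LEMMAS AND PROOFS =====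

-- B's flattened row for a list of A-side grouped entries: first entry, then ';' before each later one.
def sepFlat : List (List String) → List String
  | [] => []
  | e :: rest => e ++ rest.flatMap (fun x => ";" :: x)

def pvF : String × List (List String) → String × List String := fun p => (p.1, sepFlat p.2)

def pvStepA (field_list : Option (List Int)) (group_map : PySem.Dict String (List (List String))) (elem : List String) : PySem.Dict String (List (List String)) :=
  let donor_id := (PySem.List.pyGet? elem 5).getD ""
  if group_map.contains donor_id then
    group_map.insert donor_id (((group_map.get? donor_id).getD []) ++ [filter_fields elem field_list])
  else
    group_map.insert donor_id ([] ++ [filter_fields elem field_list])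

def pvStepB (field_list : Option (List Int)) (group_map : PySem.Dict String (List String)) (elem : List String) : PySem.Dict String (List String) :=
  let f : List String :=
    match field_list with
    | some fl => if fl ≠ [] then fl.map (fun i => (PySem.List.pyGet? elem i).getD "") else elem
    | none => elem
  let d := (PySem.List.pyGet? elem 5).getD ""
  match group_map.get? d with
  | some cur => group_map.insert d (cur ++ ";" :: f)
  | none => group_map.insert d f

def pvFB (field_list : Option (List Int)) (elem : List String) : List String :=
  match field_list with
  | some fl => if fl ≠ [] then fl.map (fun i => (PySem.List.pyGet? elem i).getD "") else elem
  | none => elem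

theorem pv_foldl_push_map {α β : Type} (g : α → β) (l : List α) (acc : List β) :
    l.foldl (fun a x => a ++ [g x]) acc = acc ++ l.map g := by
  induction l generalizing acc <;> simp [*]

theorem pv_ff_eq (elem : List String) (field_list : Option (List Int)) :
    filter_fields elem field_list = pvFB field_list elem := by
  cases field_list with
  | none => rfl
  | some fl =>
    simp only [filter_fields, pvFB]
    split_ifs with h
    · rw [pv_foldl_push_map (fun i => (PySem.List.pyGet? elem i).getD "") fl []]
      rw [List.nil_append]
    · rfl

theorem pv_find?_map_F (la : List (String × List (List String))) (d : String) :
    List.find? (fun p => p.1 == d) (la.map pvF) = (List.find? (fun p => p.1 == d) la).map pvF := by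
  induction la with
  | nil => rfl
  | cons p rest ih =>
    simp only [List.map_cons, List.find?]
    cases h : (p.1 == d) with
    | true => simp [pvF, h]
    | false => simp [pvF, h, ih]

theorem pv_any_map_F (la : List (String × List (List String))) (d : String) :
    (la.map pvF).any (fun p => p.1 == d) = la.any (fun p => p.1 == d) := by
  simp [List.any_map, pvF, Function.comp_def]

theorem pv_sepFlat_append (l : List (List String)) (f : List String) (h : l ≠ []) :
    sepFlat (l ++ [f]) = sepFlat l ++ ";" :: f := by
  cases l with
  | nil => exact absurd rfl h
  | cons e rest => simp [sepFlat]

theorem pv_tmp_aux (entries : List (List String)) :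
    ∀ t : List (List String), t ≠ [] →
      entries.foldl (fun t e => (if t ≠ [] then t ++ [[";"]] else t) ++ [e]) t
        = t ++ entries.flatMap (fun e => [[";"], e]) := by
  induction entries with
  | nil => intro t _; simp
  | cons e rest ih =>
    intro t ht
    simp only [List.foldl_cons, if_pos ht]
    rw [ih ((t ++ [[";"]]) ++ [e]) (by simp)]
    simp

theorem pv_flatten_pairs (rest : List (List String)) :
    (rest.flatMap (fun x => [[";"], x])).flatten = rest.flatMap (fun x => ";" :: x) := by
  induction rest <;> simp [*]

theorem pv_tmpfold (entries : List (List String)) :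
    (entries.foldl (fun t e => (if t ≠ [] then t ++ [[";"]] else t) ++ [e]) []).flatten
      = sepFlat entries := by
  cases entries with
  | nil => rfl
  | cons e rest =>
    simp only [List.foldl_cons]
    have h0 : ((if ([] : List (List String)) ≠ [] then ([] : List (List String)) ++ [[";"]] else []) ++ [e]) = [e] := by simp
    rw [h0, pv_tmp_aux rest [e] (by simp)]
    simp [sepFlat, pv_flatten_pairs]

theorem pv_tmpfold' (entries : List (List String)) :
    (entries.foldl (fun t e => (if t = [] then t else t ++ [[";"]]) ++ [e]) []).flatten
      = sepFlat entries := by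
  have h : (fun (t : List (List String)) e => (if t = [] then t else t ++ [[";"]]) ++ [e])
      = (fun t e => (if t ≠ [] then t ++ [[";"]] else t) ++ [e]) := by
    funext t e; by_cases ht : t = [] <;> simp [ht]
  rw [h, pv_tmpfold]

theorem pv_L7 (g : List (List String) → List String) :
    ∀ la : List (String × List (List String)), (la.map Prod.fst).Nodup →
      (la.map Prod.fst).map (fun k => g (((List.find? (fun p => p.1 == k) la).map Prod.snd).getD []))
        = la.map (fun p => g p.2) := by
  intro la
  induction la with
  | nil => intro _; rfl
  | cons p rest ih =>
    intro hnd
    simp only [List.map_cons, List.nodup_cons] at hnd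
    obtain ⟨hp, hrest⟩ := hnd
    simp only [List.map_cons]
    congr 1
    · simp [List.find?]
    · have hcong : ∀ k ∈ rest.map Prod.fst,
          g (((List.find? (fun q => q.1 == k) (p :: rest)).map Prod.snd).getD [])
            = g (((List.find? (fun q => q.1 == k) rest).map Prod.snd).getD []) := by
        intro k hk
        have hne : (p.1 == k) = false := by
          simp only [beq_eq_false_iff_ne, ne_eq]
          rintro rfl; exact hp hk
        simp [List.find?, hne]
      rw [List.map_congr_left hcong, ih hrest]

theorem pv_contains_mk {ν : Type} (l : List (String × ν)) (k : String) :
    (PySem.Dict.mk l).contains k = l.any (fun p => p.1 == k) := rfl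

theorem pv_get?_mk {ν : Type} (l : List (String × ν)) (k : String) :
    (PySem.Dict.mk l).get? k = (List.find? (fun p => p.1 == k) l).map Prod.snd := rfl

theorem pv_insert_of_contains {ν : Type} (l : List (String × ν)) (k : String) (v : ν)
    (h : (PySem.Dict.mk l).contains k = true) :
    (PySem.Dict.mk l).insert k v
      = PySem.Dict.mk (l.map (fun p => if (p.1 == k) = true then (k, v) else p)) := by
  simp [PySem.Dict.insert, h]

theorem pv_insert_of_not_contains {ν : Type} (l : List (String × ν)) (k : String) (v : ν)
    (h : (PySem.Dict.mk l).contains k = false) :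
    (PySem.Dict.mk l).insert k v = PySem.Dict.mk (l ++ [(k, v)]) := by
  simp [PySem.Dict.insert, h]

theorem pv_stepA_eq (field_list : Option (List Int)) (gm : PySem.Dict String (List (List String))) (elem : List String) :
    pvStepA field_list gm elem
      = (if gm.contains ((PySem.List.pyGet? elem 5).getD "") then
          gm.insert ((PySem.List.pyGet? elem 5).getD "")
            (((gm.get? ((PySem.List.pyGet? elem 5).getD "")).getD []) ++ [filter_fields elem field_list])
         else
          gm.insert ((PySem.List.pyGet? elem 5).getD "") ([] ++ [filter_fields elem field_list])) := rfl

theorem pv_stepB_eq (field_list : Option (List Int)) (gm : PySem.Dict String (List String)) (elem : List String) :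
    pvStepB field_list gm elem
      = (match gm.get? ((PySem.List.pyGet? elem 5).getD "") with
         | some cur => gm.insert ((PySem.List.pyGet? elem 5).getD "") (cur ++ ";" :: pvFB field_list elem)
         | none => gm.insert ((PySem.List.pyGet? elem 5).getD "") (pvFB field_list elem)) := rfl

theorem pv_inv (field_list : Option (List Int)) (fi : List (List String)) :
    ∀ la : List (String × List (List String)),
      (∀ p ∈ la, p.2 ≠ []) → (la.map Prod.fst).Nodup →
      (List.foldl (pvStepB field_list) (PySem.Dict.mk (la.map pvF)) fi
          = PySem.Dict.mk ((List.foldl (pvStepA field_list) (PySem.Dict.mk la) fi).items.map pvF))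
      ∧ (∀ p ∈ (List.foldl (pvStepA field_list) (PySem.Dict.mk la) fi).items, p.2 ≠ [])
      ∧ ((List.foldl (pvStepA field_list) (PySem.Dict.mk la) fi).items.map Prod.fst).Nodup := by
  induction fi with
  | nil => intro la h1 h2; exact ⟨rfl, h1, h2⟩
  | cons elem rest ih =>
    intro la h1 h2
    simp only [List.foldl_cons]
    by_cases hc : la.any (fun p => p.1 == (PySem.List.pyGet? elem 5).getD "") = true
    · -- donor already present: both overwrite in place
      set d := (PySem.List.pyGet? elem 5).getD "" with hd
      obtain ⟨p0, hp0⟩ : ∃ p0, List.find? (fun p => p.1 == d) la = some p0 := by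
        rw [← Option.isSome_iff_exists, List.find?_isSome]
        simpa using hc
      have hp0ne : p0.2 ≠ [] := h1 p0 (List.mem_of_find?_eq_some hp0)
      have hcA : (PySem.Dict.mk la).contains d = true := by rw [pv_contains_mk]; exact hc
      have hcB : (PySem.Dict.mk (la.map pvF)).contains d = true := by
        rw [pv_contains_mk, pv_any_map_F]; exact hc
      have hgA : (PySem.Dict.mk la).get? d = some p0.2 := by
        rw [pv_get?_mk, hp0]; rfl
      have hgB : (PySem.Dict.mk (la.map pvF)).get? d = some (sepFlat p0.2) := by
        rw [pv_get?_mk, pv_find?_map_F, hp0]; rfl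
      have hstepA : pvStepA field_list (PySem.Dict.mk la) elem
          = PySem.Dict.mk (la.map (fun p => if (p.1 == d) = true
              then (d, p0.2 ++ [filter_fields elem field_list]) else p)) := by
        rw [pv_stepA_eq, ← hd, if_pos hcA, hgA]
        exact pv_insert_of_contains la d _ hcA
      have hstepB : pvStepB field_list (PySem.Dict.mk (la.map pvF)) elem
          = PySem.Dict.mk ((la.map pvF).map (fun q => if (q.1 == d) = true
              then (d, sepFlat p0.2 ++ ";" :: pvFB field_list elem) else q)) := by
        rw [pv_stepB_eq, ← hd, hgB]
        exact pv_insert_of_contains (la.map pvF) d _ hcB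
      rw [hstepA, hstepB]
      have hmapeq : (la.map pvF).map (fun q => if (q.1 == d) = true
              then (d, sepFlat p0.2 ++ ";" :: pvFB field_list elem) else q)
          = (la.map (fun p => if (p.1 == d) = true
              then (d, p0.2 ++ [filter_fields elem field_list]) else p)).map pvF := by
        rw [List.map_map, List.map_map]
        apply List.map_congr_left
        intro p _
        by_cases hpd : p.1 = d
        · simp only [Function.comp_apply, pvF, hpd, beq_self_eq_true, if_pos]
          rw [pv_sepFlat_append _ _ hp0ne, pv_ff_eq]
        · simp [Function.comp_apply, pvF, hpd]
      rw [hmapeq]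
      apply ih
      · intro p hp
        obtain ⟨q, hq, rfl⟩ := List.mem_map.mp hp
        by_cases hqd : q.1 = d
        · simp [hqd]
        · simpa [hqd] using h1 q hq
      · have hkeys : (la.map (fun p => if (p.1 == d) = true
              then (d, p0.2 ++ [filter_fields elem field_list]) else p)).map Prod.fst
            = la.map Prod.fst := by
          rw [List.map_map]
          apply List.map_congr_left
          intro p _
          by_cases hpd : p.1 = d
          · simp [hpd]
          · simp [hpd]
        rw [hkeys]; exact h2
    · -- new donor: both append
      set d := (PySem.List.pyGet? elem 5).getD "" with hd
      have hcF : (PySem.Dict.mk la).contains d = false := by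
        rw [pv_contains_mk]; exact Bool.not_eq_true _ ▸ (by simpa using hc)
      have hcFB : (PySem.Dict.mk (la.map pvF)).contains d = false := by
        rw [pv_contains_mk, pv_any_map_F]
        exact Bool.not_eq_true _ ▸ (by simpa using hc)
      have hfind : List.find? (fun p => p.1 == d) la = none := by
        rw [List.find?_eq_none]
        intro p hp hb
        exact hc (List.any_eq_true.mpr ⟨p, hp, hb⟩)
      have hstepA : pvStepA field_list (PySem.Dict.mk la) elem
          = PySem.Dict.mk (la ++ [(d, [] ++ [filter_fields elem field_list])]) := by
        rw [pv_stepA_eq, ← hd, if_neg (by rw [hcF]; exact Bool.false_ne_true)]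
        exact pv_insert_of_not_contains la d _ hcF
      have hstepB : pvStepB field_list (PySem.Dict.mk (la.map pvF)) elem
          = PySem.Dict.mk (la.map pvF ++ [(d, pvFB field_list elem)]) := by
        rw [pv_stepB_eq, ← hd, pv_get?_mk, pv_find?_map_F, hfind]
        exact pv_insert_of_not_contains (la.map pvF) d _ hcFB
      rw [hstepA, hstepB]
      have hmapeq : la.map pvF ++ [(d, pvFB field_list elem)]
          = (la ++ [(d, [] ++ [filter_fields elem field_list])]).map pvF := by
        rw [List.map_append]
        congr 1
        simp [pvF, sepFlat, pv_ff_eq]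
      rw [hmapeq]
      apply ih
      · intro p hp
        rcases List.mem_append.mp hp with h | h
        · exact h1 p h
        · simp only [List.mem_singleton] at h
          subst h; simp
      · simp only [List.map_append, List.map_cons, List.map_nil]
        rw [List.nodup_append]
        refine ⟨h2, List.nodup_singleton d, ?_⟩
        intro x hx b hb heq
        simp only [List.mem_singleton] at hb
        obtain ⟨p, hp, hpd⟩ := List.mem_map.mp hx
        exact hc (List.any_eq_true.mpr ⟨p, hp, by simp [hpd, heq, hb]⟩)

-- ===== VERDICT (by name: the statement is the Claim_ definition above) =====
theorem group_formatted_info_by_donor_spec : Claim_equal_group_formatted_info_by_donor := by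
  intro fi fl _ _
  unfold Spec_group_formatted_info_by_donor
  obtain ⟨hEq, hNe, hNd⟩ := pv_inv fl fi [] (by simp) (by simp)
  show group_formatted_info_by_donor fi fl = group_formatted_info_by_donor_alt fi fl
  have hA : group_formatted_info_by_donor fi fl =
      (let gm := List.foldl (pvStepA fl) (PySem.Dict.mk []) fi
       gm.keys.foldl (fun out key =>
         out ++ [(((gm.get? key).getD []).foldl
           (fun t e => (if t ≠ [] then t ++ [[";"]] else t) ++ [e]) []).flatten]) []) := rfl
  have hB : group_formatted_info_by_donor_alt fi fl =
      (List.foldl (pvStepB fl) (PySem.Dict.mk []) fi).values := rfl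
  rw [hA, hB]
  have h0 : (PySem.Dict.mk [] : PySem.Dict String (List String))
      = PySem.Dict.mk (([] : List (String × List (List String))).map pvF) := rfl
  rw [h0, hEq]
  set la := (List.foldl (pvStepA fl) (PySem.Dict.mk []) fi).items with hla
  show (List.foldl (pvStepA fl) (PySem.Dict.mk []) fi).keys.foldl _ [] = _
  have hkeys : (List.foldl (pvStepA fl) (PySem.Dict.mk []) fi).keys = la.map Prod.fst := rfl
  have hget : ∀ key, ((List.foldl (pvStepA fl) (PySem.Dict.mk []) fi).get? key)
      = (List.find? (fun p => p.1 == key) la).map Prod.snd := fun _ => rfl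
  rw [hkeys]
  rw [pv_foldl_push_map (fun key =>
    ((((List.foldl (pvStepA fl) (PySem.Dict.mk []) fi).get? key).getD []).foldl
      (fun t e => (if t ≠ [] then t ++ [[";"]] else t) ++ [e]) []).flatten)]
  simp only [hget, List.nil_append]
  rw [pv_L7 (fun entries => (entries.foldl
      (fun t e => (if t ≠ [] then t ++ [[";"]] else t) ++ [e]) []).flatten) la hNd]
  show _ = (PySem.Dict.mk (la.map pvF)).values
  simp only [PySem.Dict.values, List.map_map]
  apply List.map_congr_left
  intro p _
  simp [Function.comp_apply, pvF, pv_tmpfold']
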